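-- pv_equiv track=rewrite | github.com/gh0stwin/marlgrid | marlgrid/envs/open_doors.py | _doors_opened_by_order
-- ===== SOURCE A (Python) =====
-- def _doors_opened_by_order(doors):
--     seen_closed_door = False
--
--     for door in doors:
--         if door is False:
--             seen_closed_door = True
--         elif door is True and seen_closed_door is True:
--             return False
--
--     return True
-- ===== SOURCE B (Python) =====
-- def _doors_opened_by_order(doors):
--     lst = list(doors)
--     idx = next((i for i, d in enumerate(lst) if d is False), None)
--     if idx is None:
--         return True
--     return not any(d is True for d in lst[idx + 1:])
-- ===== Notes on version B (the rewrite author's own statement) =====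
-- stated objective: alternative
-- what changed: Replaces A's single flag-carrying pass with a find-index-of-first-closed-door step followed by an any-scan of the tail, keeping the `is` identity tests.
import Mathlib
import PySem

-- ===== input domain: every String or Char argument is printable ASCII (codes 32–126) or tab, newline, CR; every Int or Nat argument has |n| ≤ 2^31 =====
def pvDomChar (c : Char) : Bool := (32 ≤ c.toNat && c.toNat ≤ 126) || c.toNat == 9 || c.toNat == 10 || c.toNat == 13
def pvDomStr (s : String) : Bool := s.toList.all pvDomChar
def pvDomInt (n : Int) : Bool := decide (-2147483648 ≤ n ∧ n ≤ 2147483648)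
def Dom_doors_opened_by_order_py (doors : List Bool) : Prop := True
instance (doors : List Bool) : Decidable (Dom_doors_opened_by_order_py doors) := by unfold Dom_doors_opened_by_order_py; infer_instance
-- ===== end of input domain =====

-- B replaces A's flag-carrying single pass by find-first-closed-door-index then an any-scan of the tail (alternative decomposition, same cost).
-- ===== PORT A =====
def pvALoop (doors : List Bool) (seenClosed : Bool) : Bool :=
  match doors with
  | [] => true
  | door :: rest =>
    if door == false then pvALoop rest true
    else if door == true && seenClosed == true then false
    else pvALoop rest seenClosed

def doors_opened_by_order_py (doors : List Bool) : Bool :=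
  pvALoop doors false

-- ===== PORT B =====
def doors_opened_by_order_py_alt (doors : List Bool) : Bool :=
  match doors.findIdx? (fun d => d == false) with
  | none => true
  | some idx => !((doors.drop (idx + 1)).any (fun d => d == true))

-- ===== PRECONDITION & SPEC =====
def Spec_doors_opened_by_order_py (doors : List Bool) (out : Bool) : Prop := out = doors_opened_by_order_py_alt doors
instance (doors : List Bool) (out : Bool) : Decidable (Spec_doors_opened_by_order_py doors out) := by unfold Spec_doors_opened_by_order_py; infer_instance

-- ===== CLAIM (what is proved, stated in full; the proofs are below) =====
def Claim_equal_doors_opened_by_order_py : Prop := ∀ (doors : List Bool), Dom_doors_opened_by_order_py doors → Spec_doors_opened_by_order_py doors (doors_opened_by_order_py doors)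

-- ===== LEMMAS AND PROOFS =====

theorem pvALoop_true (doors : List Bool) : pvALoop doors true = !(doors.any (fun d => d == true)) := by
  induction doors with
  | nil => rfl
  | cons d rest ih =>
    cases d <;> simp [pvALoop, ih]

theorem pvALoop_false_eq_alt (doors : List Bool) :
    pvALoop doors false = doors_opened_by_order_py_alt doors := by
  induction doors with
  | nil => rfl
  | cons d rest ih =>
    cases d with
    | false =>
      simp [pvALoop, doors_opened_by_order_py_alt, List.findIdx?_cons, pvALoop_true]
    | true =>
      rw [pvALoop]
      simp only [ih, doors_opened_by_order_py_alt, List.findIdx?_cons]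
      cases h : rest.findIdx? (fun d => d == false) with
      | none => simp [h]
      | some i => simp [h, List.drop_succ_cons]

-- ===== VERDICT (by name: the statement is the Claim_ definition above) =====
theorem doors_opened_by_order_py_spec : Claim_equal_doors_opened_by_order_py := by
  intro doors _
  unfold Spec_doors_opened_by_order_py doors_opened_by_order_py
  exact pvALoop_false_eq_alt doors
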